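-- pv_equiv track=rewrite | github.com/isekai-portal/Link-Context-Learning | mllm/dataset/single_image_dataset/goldG.py | merge_tokens_positive
-- ===== SOURCE A (Python) =====
-- def merge_tokens_positive(caption, tokens_positive: list):
--     rets = []
--     prev = [tokens_positive[0][0], tokens_positive[0][1]]
--     for span in tokens_positive[1:]:
--         inter = caption[prev[1]: span[0]]
--         # inter is "" or "  "
--         if (not inter) or inter.isspace():
--             prev[1] = span[1]
--         else:
--             rets.append(prev)
--             prev = [span[0], span[1]]
--     rets.append(prev)
--     return rets
-- ===== SOURCE B (Python) =====
-- def merge_tokens_positive(caption, tokens_positive: list):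
--     # Build the result back-to-front: scan the spans right-to-left, prepending a
--     # new group when the gap to the group built so far is non-whitespace, else
--     # widening that group's start.  Correct because A's running end prev[1] is
--     # always just the previous span's end, so the gap test is between adjacent
--     # spans, and the leftmost span of the rightmost group is the next span.
--     res = [[tokens_positive[-1][0], tokens_positive[-1][1]]]
--     for span in reversed(tokens_positive[:-1]):
--         gap = caption[span[1]: res[0][0]]
--         if gap and not gap.isspace():
--             res.insert(0, [span[0], span[1]])
--         else:
--             res[0][0] = span[0]
--     return res
-- ===== Notes on version B (the rewrite author's own statement) =====
-- stated objective: alternative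
-- what changed: B scans the spans right-to-left and builds the output back-to-front, prepending a new group or widening the current group's start, relying on the fact that A's gap test only ever compares adjacent spans; A scans left-to-right appending with a mutable running pair.
import Mathlib
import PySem

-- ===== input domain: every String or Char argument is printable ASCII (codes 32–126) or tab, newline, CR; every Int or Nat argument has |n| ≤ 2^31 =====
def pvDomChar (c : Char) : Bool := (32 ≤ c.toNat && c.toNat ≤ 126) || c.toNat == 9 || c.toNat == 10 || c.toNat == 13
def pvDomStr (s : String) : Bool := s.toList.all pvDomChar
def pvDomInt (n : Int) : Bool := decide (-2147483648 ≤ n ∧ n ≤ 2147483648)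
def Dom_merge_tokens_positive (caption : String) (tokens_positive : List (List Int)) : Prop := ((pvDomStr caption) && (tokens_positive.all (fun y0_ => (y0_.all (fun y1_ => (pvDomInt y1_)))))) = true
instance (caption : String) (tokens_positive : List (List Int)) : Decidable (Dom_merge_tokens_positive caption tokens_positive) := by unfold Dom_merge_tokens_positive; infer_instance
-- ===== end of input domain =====

-- B builds the result back-to-front (right-to-left scan, prepend or widen the
-- current group's start), instead of A's left-to-right pass with a mutable
-- running pair; equivalence is about return values (neither mutates its arguments).

-- ===== PORT A =====
-- loop state: rets (output so far) and the running pair prev = [p0, p1]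
def mtpA_loop (caption : List Char) (spans : List (List Int)) (rets : List (List Int)) (p0 p1 : Int) : List (List Int) :=
  match spans with
  | [] => rets ++ [[p0, p1]]
  | span :: rest =>
    let s0 := PySem.List.pyGetD span 0 0
    let s1 := PySem.List.pyGetD span 1 0
    let inter := PySem.List.slice caption (some p1) (some s0)
    if inter.isEmpty || PySem.Chars.strIsspace inter then
      mtpA_loop caption rest rets p0 s1
    else
      mtpA_loop caption rest (rets ++ [[p0, p1]]) s0 s1

def merge_tokens_positive (caption : String) (tokens_positive : List (List Int)) : List (List Int) :=
  match tokens_positive with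
  | [] => []  -- Python raises IndexError here; excluded by Pre_
  | first :: rest =>
      mtpA_loop caption.toList rest [] (PySem.List.pyGetD first 0 0) (PySem.List.pyGetD first 1 0)

-- ===== PORT B =====
-- res[0][0] = v  (res's head is always a 2-element list B built itself, so the
-- Python element assignment is exact as List.set at index 0)
def mtpSetStart (res : List (List Int)) (v : Int) : List (List Int) :=
  match res with
  | [] => []
  | h :: t => h.set 0 v :: t

-- one iteration of B's right-to-left loop body
def mtpB_step (caption : List Char) (res : List (List Int)) (span : List Int) : List (List Int) :=
  let gap := PySem.List.slice caption (some (PySem.List.pyGetD span 1 0))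
               (some (PySem.List.pyGetD (PySem.List.pyGetD res 0 []) 0 0))
  if !gap.isEmpty && !PySem.Chars.strIsspace gap then
    [PySem.List.pyGetD span 0 0, PySem.List.pyGetD span 1 0] :: res
  else
    mtpSetStart res (PySem.List.pyGetD span 0 0)

def merge_tokens_positive_alt (caption : String) (tokens_positive : List (List Int)) : List (List Int) :=
  match tokens_positive with
  | [] => []  -- Python raises IndexError here; excluded by Pre_
  | _ :: _ =>
      let last := PySem.List.pyGetD tokens_positive (-1) []
      ((PySem.List.slice tokens_positive none (some (-1))).reverse).foldl
        (mtpB_step caption.toList)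
        [[PySem.List.pyGetD last 0 0, PySem.List.pyGetD last 1 0]]

-- ===== PRECONDITION & SPEC =====
-- Pre_ excludes exactly the inputs on which Python A raises IndexError:
-- an empty span list, or some span with fewer than 2 elements.
def Pre_merge_tokens_positive (caption : String) (tokens_positive : List (List Int)) : Prop :=
  tokens_positive ≠ [] ∧ ∀ s ∈ tokens_positive, 2 ≤ s.length
instance (caption : String) (tokens_positive : List (List Int)) : Decidable (Pre_merge_tokens_positive caption tokens_positive) := by unfold Pre_merge_tokens_positive; infer_instance

def pvWitness_merge_tokens_positive : String × List (List Int) := ("a bc d", [[0, 1], [2, 4], [5, 6]])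

def Spec_merge_tokens_positive (caption : String) (tokens_positive : List (List Int)) (out : List (List Int)) : Prop := out = merge_tokens_positive_alt caption tokens_positive
instance (caption : String) (tokens_positive : List (List Int)) (out : List (List Int)) : Decidable (Spec_merge_tokens_positive caption tokens_positive out) := by unfold Spec_merge_tokens_positive; infer_instance

-- ===== CLAIM =====
def Claim_equal_merge_tokens_positive : Prop := ∀ (caption : String) (tokens_positive : List (List Int)), Dom_merge_tokens_positive caption tokens_positive → Pre_merge_tokens_positive caption tokens_positive → Spec_merge_tokens_positive caption tokens_positive (merge_tokens_positive caption tokens_positive)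

-- ===== LEMMAS AND PROOFS =====

-- abbreviations used only by the proofs
def mtpG0 (s : List Int) : Int := PySem.List.pyGetD s 0 0
def mtpG1 (s : List Int) : Int := PySem.List.pyGetD s 1 0
def mtpWs (caption : List Char) (a b : Int) : Bool :=
  let gap := PySem.List.slice caption (some a) (some b)
  gap.isEmpty || PySem.Chars.strIsspace gap

-- canonical left-to-right recursion (A without the accumulator)
def mtpSpec (caption : List Char) (p0 p1 : Int) : List (List Int) → List (List Int)
  | [] => [[p0, p1]]
  | s :: rest =>
      if mtpWs caption p1 (mtpG0 s) then mtpSpec caption p0 (mtpG1 s) rest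
      else [p0, p1] :: mtpSpec caption (mtpG0 s) (mtpG1 s) rest

-- canonical right-to-left recursion (B without the fold)
def mtpR (caption : List Char) : List (List Int) → List (List Int)
  | [] => []
  | [s] => [[mtpG0 s, mtpG1 s]]
  | s :: t :: rest =>
      let r := mtpR caption (t :: rest)
      if mtpWs caption (mtpG1 s) (PySem.List.pyGetD (PySem.List.pyGetD r 0 []) 0 0) then
        mtpSetStart r (mtpG0 s)
      else
        [mtpG0 s, mtpG1 s] :: r

lemma mtpA_loop_eq (caption : List Char) (spans : List (List Int)) :
    ∀ (rets : List (List Int)) (p0 p1 : Int),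
      mtpA_loop caption spans rets p0 p1 = rets ++ mtpSpec caption p0 p1 spans := by
  induction spans with
  | nil => intro rets p0 p1; simp [mtpA_loop, mtpSpec]
  | cons s rest ih =>
    intro rets p0 p1
    simp only [mtpA_loop, mtpSpec, mtpWs, mtpG0, mtpG1]
    split
    · exact ih rets p0 _
    · rw [ih]; simp

lemma mtpR_head (caption : List Char) (s : List Int) (rest : List (List Int)) :
    ∃ y r', mtpR caption (s :: rest) = [mtpG0 s, y] :: r' := by
  induction rest generalizing s with
  | nil => exact ⟨mtpG1 s, [], rfl⟩
  | cons t rr ih =>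
    obtain ⟨y, r', hy⟩ := ih t
    simp only [mtpR, hy]
    split
    · exact ⟨y, r', rfl⟩
    · exact ⟨mtpG1 s, _, rfl⟩

-- mtpR only looks at the head span through its first two entries
lemma mtpR_congr (caption : List Char) (s s' : List Int) (rest : List (List Int))
    (h0 : mtpG0 s = mtpG0 s') (h1 : mtpG1 s = mtpG1 s') :
    mtpR caption (s :: rest) = mtpR caption (s' :: rest) := by
  cases rest with
  | nil => simp [mtpR, h0, h1]
  | cons t rr => simp only [mtpR, h0, h1]

-- replacing the head span's start only moves the first group's start
lemma mtpR_setStart (caption : List Char) (s : List Int) (rest : List (List Int)) (p0 : Int) :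
    mtpR caption ([p0, mtpG1 s] :: rest) = mtpSetStart (mtpR caption (s :: rest)) p0 := by
  have g0 : mtpG0 [p0, mtpG1 s] = p0 := by simp [mtpG0, PySem.List.pyGetD_zero_cons]
  have g1 : mtpG1 [p0, mtpG1 s] = mtpG1 s := by simp [mtpG1, PySem.List.pyGetD]
  cases rest with
  | nil => simp [mtpR, mtpSetStart, g0, g1]
  | cons t rr =>
    simp only [mtpR, g0, g1]
    split
    · cases h : mtpR caption (t :: rr) with
      | nil => simp [mtpSetStart]
      | cons h' t' => simp [mtpSetStart, List.set_set]
    · simp [mtpSetStart]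

lemma mtpSpec_eq_R (caption : List Char) (spans : List (List Int)) :
    ∀ (p0 p1 : Int), mtpSpec caption p0 p1 spans = mtpR caption ([p0, p1] :: spans) := by
  induction spans with
  | nil =>
    intro p0 p1
    simp [mtpSpec, mtpR, mtpG0, mtpG1, PySem.List.pyGetD]
  | cons s rest ih =>
    intro p0 p1
    obtain ⟨y, r', hy⟩ := mtpR_head caption s rest
    have g0 : mtpG0 [p0, p1] = p0 := by simp [mtpG0, PySem.List.pyGetD_zero_cons]
    have g1 : mtpG1 [p0, p1] = p1 := by simp [mtpG1, PySem.List.pyGetD]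
    have hhead : PySem.List.pyGetD (PySem.List.pyGetD (mtpR caption (s :: rest)) 0 []) 0 0 = mtpG0 s := by
      rw [hy]; simp [PySem.List.pyGetD_zero_cons]
    simp only [mtpSpec, mtpR, g0, g1, hhead]
    split
    · rw [ih p0 (mtpG1 s), mtpR_setStart]
    · rw [ih (mtpG0 s) (mtpG1 s),
        mtpR_congr caption ([mtpG0 s, mtpG1 s]) s rest
          (by simp [mtpG0, PySem.List.pyGetD_zero_cons])
          (by simp [mtpG1, PySem.List.pyGetD])]

-- B's reversed fold is the right-to-left recursion
lemma mtpB_fold_eq_R (caption : List Char) (front : List (List Int)) (last : List Int) :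
    front.reverse.foldl (mtpB_step caption) [[mtpG0 last, mtpG1 last]]
      = mtpR caption (front ++ [last]) := by
  rw [List.foldl_reverse]
  induction front with
  | nil => simp [mtpR, mtpG0, mtpG1]
  | cons s fr ih =>
    simp only [List.foldr_cons, ih, List.cons_append]
    obtain ⟨t, rr, ht⟩ : ∃ t rr, fr ++ [last] = t :: rr := by
      cases fr with
      | nil => exact ⟨last, [], rfl⟩
      | cons a b => exact ⟨a, b ++ [last], rfl⟩
    rw [ht]
    simp only [mtpB_step, mtpR, mtpWs, mtpG0, mtpG1]
    rw [← Bool.not_or]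
    cases hws : ((PySem.List.slice caption (some (PySem.List.pyGetD s 1 0))
        (some (PySem.List.pyGetD (PySem.List.pyGetD (mtpR caption (t :: rr)) 0 []) 0 0))).isEmpty
        || PySem.Chars.strIsspace (PySem.List.slice caption (some (PySem.List.pyGetD s 1 0))
        (some (PySem.List.pyGetD (PySem.List.pyGetD (mtpR caption (t :: rr)) 0 []) 0 0)))) with
    | true => simp
    | false => simp

-- ===== VERDICT =====
theorem merge_tokens_positive_spec : Claim_equal_merge_tokens_positive := by
  intro caption tokens_positive _ _
  unfold Spec_merge_tokens_positive
  cases tokens_positive with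
  | nil => rfl
  | cons first rest =>
    have haltr : merge_tokens_positive_alt caption (first :: rest)
        = ((PySem.List.slice (first :: rest) none (some (-1))).reverse).foldl
            (mtpB_step caption.toList)
            [[PySem.List.pyGetD (PySem.List.pyGetD (first :: rest) (-1) ([] : List Int)) 0 0,
              PySem.List.pyGetD (PySem.List.pyGetD (first :: rest) (-1) ([] : List Int)) 1 0]] := rfl
    have hne : (first :: rest) ≠ ([] : List (List Int)) := by simp
    rw [haltr, PySem.List.slice_to_neg_one, PySem.List.pyGetD_neg_one (h := hne)]
    have hfold := mtpB_fold_eq_R caption.toList (first :: rest).dropLast ((first :: rest).getLast hne)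
    rw [List.dropLast_append_getLast hne] at hfold
    unfold mtpG0 mtpG1 at hfold
    rw [hfold]
    show mtpA_loop caption.toList rest [] (PySem.List.pyGetD first 0 0) (PySem.List.pyGetD first 1 0)
       = mtpR caption.toList (first :: rest)
    rw [mtpA_loop_eq, List.nil_append, mtpSpec_eq_R,
        mtpR_congr caption.toList ([PySem.List.pyGetD first 0 0, PySem.List.pyGetD first 1 0]) first rest
          (by simp [mtpG0, PySem.List.pyGetD_zero_cons])
          (by simp [mtpG1, PySem.List.pyGetD])]
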